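-- pv_equiv track=rewrite | github.com/Keerthika246/python-program | fibo.py | generate_non_fibonacci
-- ===== SOURCE A (Python) =====
-- def generate_non_fibonacci(N):
--
--     fib_set = {0, 1}
--     a, b = 0, 1
--     while b <= N:
--         a, b = b, a + b
--         fib_set.add(b)
--     non_fib = [i for i in range(2, N + 1) if i not in fib_set]
--     return non_fib
-- ===== SOURCE B (Python) =====
-- def generate_non_fibonacci(N):
--     # Two-pointer merge: walk the range once, keeping only a scalar Fibonacci
--     # cursor (a, b) instead of a precomputed membership set.
--     res = []
--     a, b = 1, 2
--     for i in range(2, N + 1):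
--         if i == b:
--             a, b = b, a + b
--         else:
--             res.append(i)
--     return res
-- ===== Notes on version B (the rewrite author's own statement) =====
-- stated objective: alternative
-- what changed: Replaced the precomputed Fibonacci membership set and its lookup with a single merge pass that keeps only a scalar (a, b) Fibonacci cursor advanced in step with the range.
import Mathlib
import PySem

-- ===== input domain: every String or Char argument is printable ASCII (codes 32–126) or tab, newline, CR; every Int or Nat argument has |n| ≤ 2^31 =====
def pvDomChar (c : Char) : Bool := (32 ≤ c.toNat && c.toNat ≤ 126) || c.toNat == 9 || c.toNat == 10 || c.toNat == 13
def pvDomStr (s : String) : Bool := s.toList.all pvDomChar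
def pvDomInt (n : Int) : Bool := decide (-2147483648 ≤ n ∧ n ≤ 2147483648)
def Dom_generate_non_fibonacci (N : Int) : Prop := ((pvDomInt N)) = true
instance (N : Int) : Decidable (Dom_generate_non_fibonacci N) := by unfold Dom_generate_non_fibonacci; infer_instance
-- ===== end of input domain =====

-- B replaces A's precomputed Fibonacci membership set by a single merge pass with a
-- scalar (a, b) Fibonacci cursor (objective: alternative algorithm, same cost).

-- ===== PORT A =====
-- the 'while b <= N: a, b = b, a + b; fib_set.add(b)' loop (hypothesis args only for termination)
def fibLoop (N a b : Int) (ha : 0 ≤ a) (_hab : a ≤ b) (hb : 1 ≤ b) (s : PySem.Set Int) : PySem.Set Int :=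
  if h : b ≤ N then
    fibLoop N b (a + b) (by omega) (by omega) (by omega) (s.add (a + b))
  else s
termination_by (2 * N + 2 - a - b).toNat
decreasing_by omega

def generate_non_fibonacci (N : Int) : List Int :=
  let fib_set := fibLoop N 0 1 (by norm_num) (by norm_num) (by norm_num) (PySem.Set.ofList [0, 1])
  (PySem.List.pyRange 2 (N + 1) 1).filter (fun i => !(PySem.Set.contains fib_set i))

-- ===== PORT B =====
def generate_non_fibonacci_alt (N : Int) : List Int :=
  ((PySem.List.pyRange 2 (N + 1) 1).foldl
    (fun st i =>
      if i = st.2.2 then (st.1, st.2.2, st.2.1 + st.2.2) else (st.1 ++ [i], st.2.1, st.2.2))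
    (([] : List Int), (1 : Int), (2 : Int))).1

-- ===== PRECONDITION & SPEC =====
def Spec_generate_non_fibonacci (N : Int) (out : List Int) : Prop := out = generate_non_fibonacci_alt N
instance (N : Int) (out : List Int) : Decidable (Spec_generate_non_fibonacci N out) := by unfold Spec_generate_non_fibonacci; infer_instance

-- ===== CLAIM (what is proved, stated in full; the proofs are below) =====
def Claim_equal_generate_non_fibonacci : Prop := ∀ (N : Int), Dom_generate_non_fibonacci N → Spec_generate_non_fibonacci N (generate_non_fibonacci N)

-- ===== LEMMAS AND PROOFS =====

-- the Fibonacci sequence 0, 1, 1, 2, 3, 5, …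
def fibi : Nat → Int
  | 0 => 0
  | 1 => 1
  | n + 2 => fibi n + fibi (n + 1)

lemma fibi_nonneg : ∀ n, 0 ≤ fibi n := by
  intro n
  induction n using Nat.strong_induction_on with
  | _ n ih =>
    match n with
    | 0 => simp [fibi]
    | 1 => simp [fibi]
    | m + 2 =>
      have h1 := ih m (by omega)
      have h2 := ih (m + 1) (by omega)
      simp only [fibi]; omega

lemma fibi_succ_pos : ∀ n, 1 ≤ fibi (n + 1) := by
  intro n
  induction n using Nat.strong_induction_on with
  | _ n ih =>
    match n with
    | 0 => simp [fibi]
    | m + 1 =>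
      have h1 := fibi_nonneg m
      have h2 := ih m (by omega)
      simp only [fibi]; omega

lemma fibi_le_succ (n : Nat) : fibi n ≤ fibi (n + 1) := by
  match n with
  | 0 => simp [fibi]
  | m + 1 =>
    have := fibi_nonneg m
    have := fibi_nonneg (m + 1)
    simp only [fibi]; omega

lemma fibi_mono {m n : Nat} (h : m ≤ n) : fibi m ≤ fibi n := by
  induction n with
  | zero => simp_all
  | succ k ih =>
    rcases Nat.lt_or_ge m (k + 1) with h' | h'
    · exact le_trans (ih (by omega)) (fibi_le_succ k)
    · have : m = k + 1 := by omega
      simp [this]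

lemma fibLoop_irrel (N a a' b b' : Int) (hA : a = a') (hB : b = b')
    (ha : 0 ≤ a) (hab : a ≤ b) (hb : 1 ≤ b)
    (ha' : 0 ≤ a') (hab' : a' ≤ b') (hb' : 1 ≤ b') (s : PySem.Set Int) :
    fibLoop N a b ha hab hb s = fibLoop N a' b' ha' hab' hb' s := by
  subst hA; subst hB; rfl

-- membership in the set built by A's while loop, from a consecutive-Fibonacci state
lemma fibLoop_mem (N : Int) : ∀ (fuel : Nat) (k : Nat) (s : PySem.Set Int)
    (ha : 0 ≤ fibi k) (hab : fibi k ≤ fibi (k + 1)) (hb : 1 ≤ fibi (k + 1)) (x : Int),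
    (2 * N + 2 - fibi k - fibi (k + 1)).toNat ≤ fuel →
    (x ∈ fibLoop N (fibi k) (fibi (k + 1)) ha hab hb s ↔
      x ∈ s ∨ ∃ m, k + 2 ≤ m ∧ x = fibi m ∧ fibi (m - 1) ≤ N) := by
  intro fuel
  induction fuel with
  | zero =>
    intro k s ha hab hb x hfuel
    rw [fibLoop]
    have hbn : ¬ fibi (k + 1) ≤ N := by omega
    simp only [hbn, dite_false]
    constructor
    · intro h; exact Or.inl h
    · rintro (h | ⟨m, hm, rfl, hmN⟩)
      · exact h
      · exfalso
        have : fibi (k + 1) ≤ fibi (m - 1) := fibi_mono (by omega)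
        omega
  | succ f ih =>
    intro k s ha hab hb x hfuel
    rw [fibLoop]
    by_cases hbn : fibi (k + 1) ≤ N
    · simp only [hbn, dite_true]
      have hstep : fibi k + fibi (k + 1) = fibi (k + 1 + 1) := rfl
      have h2 : fibi (k + 1) ≤ fibi (k + 1 + 1) := fibi_le_succ (k + 1)
      have key := ih (k + 1) (s.add (fibi k + fibi (k + 1)))
        (by omega) (by omega) (by omega) x (by omega)
      rw [fibLoop_irrel N (fibi (k + 1)) (fibi (k + 1)) (fibi k + fibi (k + 1)) (fibi (k + 1 + 1))
        rfl hstep (by omega) (by omega) (by omega) (by omega) h2 (by omega)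
        (s.add (fibi k + fibi (k + 1)))]
      rw [key]
      have hmem : x ∈ s.add (fibi k + fibi (k + 1)) ↔ x ∈ s ∨ x = fibi (k + 2) := by
        rw [hstep, PySem.Set.mem_add]
      rw [hmem]
      constructor
      · rintro ((h | h) | ⟨m, hm, rfl, hmN⟩)
        · exact Or.inl h
        · exact Or.inr ⟨k + 2, by omega, h, by simpa using hbn⟩
        · exact Or.inr ⟨m, by omega, rfl, hmN⟩
      · rintro (h | ⟨m, hm, rfl, hmN⟩)
        · exact Or.inl (Or.inl h)
        · rcases Nat.lt_or_ge m (k + 3) with hm' | hm'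
          · have : m = k + 2 := by omega
            subst this
            exact Or.inl (Or.inr rfl)
          · exact Or.inr ⟨m, by omega, rfl, hmN⟩
    · simp only [hbn, dite_false]
      constructor
      · intro h; exact Or.inl h
      · rintro (h | ⟨m, hm, rfl, hmN⟩)
        · exact h
        · exfalso
          have : fibi (k + 1) ≤ fibi (m - 1) := fibi_mono (by omega)
          omega

-- the set A builds contains exactly the Fibonacci numbers, for 2 ≤ x ≤ N
lemma mem_fibSet (N : Int) (x : Int) (hx2 : 2 ≤ x) (hxN : x ≤ N) :
    (x ∈ fibLoop N 0 1 (by norm_num) (by norm_num) (by norm_num) (PySem.Set.ofList [0, 1])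
      ↔ ∃ m, fibi m = x) := by
  rw [fibLoop_irrel N 0 (fibi 0) 1 (fibi 1) rfl rfl (by norm_num) (by norm_num)
    (by norm_num) (by simp [fibi]) (by simp [fibi]) (by simp [fibi]) (PySem.Set.ofList [0, 1])]
  rw [fibLoop_mem N (2 * N + 2 - fibi 0 - fibi 1).toNat 0 _ _ _ _ _ (le_refl _)]
  have hofl : x ∈ PySem.Set.ofList ([0, 1] : List Int) ↔ x ∈ ([0, 1] : List Int) :=
    PySem.Set.mem_ofList _ _
  constructor
  · rintro (h | ⟨m, hm, rfl, hmN⟩)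
    · rw [hofl] at h; simp at h; omega
    · exact ⟨m, rfl⟩
  · rintro ⟨m, rfl⟩
    right
    have hm3 : 2 ≤ m := by
      by_contra h
      interval_cases m <;> simp [fibi] at hx2
    exact ⟨m, by omega, rfl, by
      calc fibi (m - 1) ≤ fibi m := fibi_mono (by omega)
        _ ≤ N := by omega⟩

-- B's merge pass from a consecutive-Fibonacci cursor yields A's filtered range
lemma altLoop (N : Int) : ∀ (fuel : Nat) (i : Int) (k : Nat) (res : List Int),
    fibi (k + 1) < i → i ≤ fibi (k + 2) → 2 ≤ i →
    (N + 1 - i).toNat ≤ fuel →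
    ((PySem.List.pyRange i (N + 1) 1).foldl
      (fun st j =>
        if j = st.2.2 then (st.1, st.2.2, st.2.1 + st.2.2) else (st.1 ++ [j], st.2.1, st.2.2))
      (res, fibi (k + 1), fibi (k + 2))).1 =
    res ++ (PySem.List.pyRange i (N + 1) 1).filter
      (fun j => !(PySem.Set.contains
        (fibLoop N 0 1 (by norm_num) (by norm_num) (by norm_num) (PySem.Set.ofList [0, 1])) j)) := by
  intro fuel
  induction fuel with
  | zero =>
    intro i k res h1 h2 h3 hfuel
    rw [PySem.List.pyRange_one_eq_nil (by omega)]
    simp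
  | succ f ih =>
    intro i k res h1 h2 h3 hfuel
    by_cases hiN : i ≤ N
    · rw [PySem.List.pyRange_one_cons (by omega)]
      simp only [List.foldl_cons, List.filter_cons]
      by_cases hfib : i = fibi (k + 2)
      · -- i is the cursor Fibonacci: skip it and advance the cursor
        have hmem : i ∈ fibLoop N 0 1 (by norm_num) (by norm_num) (by norm_num)
            (PySem.Set.ofList [0, 1]) := (mem_fibSet N i h3 hiN).2 ⟨k + 2, hfib.symm⟩
        have hc : PySem.Set.contains
            (fibLoop N 0 1 (by norm_num) (by norm_num) (by norm_num) (PySem.Set.ofList [0, 1])) i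
            = true := (PySem.Set.contains_iff _ _).2 hmem
        rw [if_pos hfib, hc]
        simp only [Bool.not_true]
        rw [if_neg (by simp : ¬ ((false : Bool) = true))]
        have hstep : fibi (k + 1) + fibi (k + 2) = fibi (k + 3) := rfl
        have hpos : 1 ≤ fibi (k + 1) := fibi_succ_pos k
        exact ih (i + 1) (k + 1) res (by show fibi (k + 2) < i + 1; omega)
          (by show i + 1 ≤ fibi (k + 3); rw [← hstep]; omega) (by omega) (by omega)
      · -- i is below the cursor Fibonacci: keep it
        have hnm : i ∉ fibLoop N 0 1 (by norm_num) (by norm_num) (by norm_num)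
            (PySem.Set.ofList [0, 1]) := by
          intro hmem
          obtain ⟨m, hm⟩ := (mem_fibSet N i h3 hiN).1 hmem
          have hm3 : 2 ≤ m := by
            by_contra h
            interval_cases m <;> simp [fibi] at hm <;> omega
          have hlo : ¬ m ≤ k + 1 := by
            intro h
            have := fibi_mono h
            omega
          have hhi : ¬ k + 2 ≤ m := by
            intro h
            have := fibi_mono h
            omega
          omega
        have hc : PySem.Set.contains
            (fibLoop N 0 1 (by norm_num) (by norm_num) (by norm_num) (PySem.Set.ofList [0, 1])) i
            = false := Bool.eq_false_iff.mpr (fun h => hnm ((PySem.Set.contains_iff _ _).1 h))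
        rw [if_neg hfib, hc]
        simp only [Bool.not_false]
        rw [if_pos trivial]
        rw [ih (i + 1) k (res ++ [i]) (by omega) (by omega) (by omega) (by omega)]
        simp
    · rw [PySem.List.pyRange_one_eq_nil (by omega)]
      simp

-- ===== VERDICT (by name: the statement is the Claim_ definition above) =====
theorem generate_non_fibonacci_spec : Claim_equal_generate_non_fibonacci := by
  intro N _
  unfold Spec_generate_non_fibonacci generate_non_fibonacci generate_non_fibonacci_alt
  have h1 : (1 : Int) = fibi (1 + 1) := rfl
  have h2 : (2 : Int) = fibi (1 + 2) := rfl
  rw [show (([] : List Int), (1 : Int), (2 : Int)) = (([] : List Int), fibi (1 + 1), fibi (1 + 2))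
    from by rw [← h1, ← h2]]
  rw [altLoop N (N + 1 - 2).toNat 2 1 [] (by rw [← h1]; norm_num) (by rw [← h2]) (le_refl 2)
    (le_refl _)]
  simp
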